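-- pv_equiv track=rewrite | github.com/cppjocker/resonanse_dna | дживас/calc_chains.py | calc_RY
-- ===== SOURCE A (Python) =====
-- def RY(nucl):
--     if (nucl == 'A') or (nucl == 'G'):
--         return 'R'
--     else:
--         return 'Y'
--
-- def calc_RY(seq, pos, nucl):
--     R_chain_len = 0
--     Y_chain_len = 0
--
--     ry_nucl = RY(nucl)
--
--
--     if ry_nucl == 'R':
--         R_chain_len = 1
--         Y_chain_len = 0
--         ry_nucl_compl = 'Y'
--     else:
--         R_chain_len = 0
--         Y_chain_len = 1
--
--         ry_nucl_compl = 'R'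
--
--     chain_len = 0
--
--     for i in range(pos - 1, 0, -1):
--         if RY(seq[i]) != ry_nucl:
--             break
--
--         chain_len+=1
--
--     for i in range(pos + 1, len(seq)):
--         if RY(seq[i]) != ry_nucl:
--             break
--
--         chain_len+=1
--
--     if ry_nucl == 'R':
--         R_chain_len += chain_len
--     else:
--         Y_chain_len += chain_len
--
--     chain_len_compl_neg = 0
--     chain_len_compl_pos = 0
--
--     for i in range(pos - 1, 0, -1):
--         if RY(seq[i]) != ry_nucl_compl:
--             break
--
--         chain_len_compl_neg+=1
--
--     for i in range(pos + 1, len(seq)):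
--         if RY(seq[i]) != ry_nucl_compl:
--             break
--
--         chain_len_compl_pos+=1
--
--     chain_len_compl = max(chain_len_compl_neg, chain_len_compl_pos)
--
--     if ry_nucl_compl == 'R':
--         R_chain_len += chain_len_compl
--     else:
--         Y_chain_len += chain_len_compl
--
--     return R_chain_len, Y_chain_len
-- ===== SOURCE B (Python) =====
-- def RY(nucl):
--     if (nucl == 'A') or (nucl == 'G'):
--         return 'R'
--     else:
--         return 'Y'
--
-- def _run(seq, idxs):
--     # scan one side once: length and RY type of the initial contiguous run
--     n = 0
--     t = None
--     for i in idxs: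
--         r = RY(seq[i])
--         if t is None:
--             t = r
--         elif r != t:
--             break
--         n += 1
--     return n, t
--
-- def calc_RY(seq, pos, nucl):
--     ry = RY(nucl)
--     ry_compl = 'Y' if ry == 'R' else 'R'
--     ln, lt = _run(seq, range(pos - 1, 0, -1))
--     rn, rt = _run(seq, range(pos + 1, len(seq)))
--     primary = (ln if lt == ry else 0) + (rn if rt == ry else 0)
--     compl = max(ln if lt == ry_compl else 0, rn if rt == ry_compl else 0)
--     if ry == 'R':
--         return 1 + primary, compl
--     else:
--         return compl, 1 + primary
-- ===== Notes on version B (the rewrite author's own statement) =====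
-- stated objective: simpler
-- what changed: B replaces A's four one-type scans (primary and complement passes over each side) with a single scan per side that records the initial run's length and RY type, then derives the primary sum and complement max from those two (length, type) pairs.
import Mathlib
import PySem

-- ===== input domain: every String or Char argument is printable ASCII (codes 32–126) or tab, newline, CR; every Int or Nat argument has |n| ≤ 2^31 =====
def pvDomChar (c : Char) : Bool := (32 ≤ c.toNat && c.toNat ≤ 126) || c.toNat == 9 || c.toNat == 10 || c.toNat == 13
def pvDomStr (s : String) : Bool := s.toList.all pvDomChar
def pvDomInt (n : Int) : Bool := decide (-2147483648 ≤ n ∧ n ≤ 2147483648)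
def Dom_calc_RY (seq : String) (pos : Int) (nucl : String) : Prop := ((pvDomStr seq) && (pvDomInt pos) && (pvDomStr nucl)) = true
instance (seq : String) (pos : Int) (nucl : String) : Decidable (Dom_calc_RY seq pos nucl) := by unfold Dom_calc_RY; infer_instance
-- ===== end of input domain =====

-- B replaces A's four one-type scans (two per side) with a single scan per side that
-- records the initial run's length and RY type; objective: simpler (same cost).

-- ===== PORT A =====
-- RY on the nucl argument (a string in Python)
def pvRYs (s : String) : Char := if s = "A" ∨ s = "G" then 'R' else 'Y'
-- RY on a character read from seq (Python compares the 1-char string to 'A'/'G')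
def pvRYc (c : Char) : Char := if c = 'A' ∨ c = 'G' then 'R' else 'Y'

-- one of A's four loops: count while RY(seq[i]) == target, break at first mismatch
-- (pyGet? = none is Python's IndexError; excluded by Pre_calc_RY)
def pvCountChain (seq : String) (target : Char) : List Int → Int
  | [] => 0
  | i :: rest =>
    match PySem.Str.pyGet? seq i with
    | none => 0
    | some c => if pvRYc c ≠ target then 0 else 1 + pvCountChain seq target rest

def calc_RY (seq : String) (pos : Int) (nucl : String) : Int × Int :=
  let ry := pvRYs nucl
  let R0 : Int := if ry = 'R' then 1 else 0
  let Y0 : Int := if ry = 'R' then 0 else 1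
  let ryc : Char := if ry = 'R' then 'Y' else 'R'
  let leftIdxs := PySem.List.pyRange (pos - 1) 0 (-1)
  let rightIdxs := PySem.List.pyRange (pos + 1) (PySem.Str.len seq) 1
  let chain := pvCountChain seq ry leftIdxs + pvCountChain seq ry rightIdxs
  let R1 := if ry = 'R' then R0 + chain else R0
  let Y1 := if ry = 'R' then Y0 else Y0 + chain
  let chainComplNeg := pvCountChain seq ryc leftIdxs
  let chainComplPos := pvCountChain seq ryc rightIdxs
  let chainCompl := max chainComplNeg chainComplPos
  if ryc = 'R' then (R1 + chainCompl, Y1) else (R1, Y1 + chainCompl)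

-- ===== PORT B =====
-- B's _run: one scan recording (run length, RY type of the first element)
def pvRunLoop (seq : String) (n : Int) (t : Option Char) : List Int → Int × Option Char
  | [] => (n, t)
  | i :: rest =>
    match PySem.Str.pyGet? seq i with
    | none => (n, t)   -- Python IndexError; excluded by Pre_calc_RY
    | some c =>
      let r := pvRYc c
      match t with
      | none => pvRunLoop seq (n + 1) (some r) rest
      | some t0 => if r ≠ t0 then (n, some t0) else pvRunLoop seq (n + 1) (some t0) rest

def calc_RY_alt (seq : String) (pos : Int) (nucl : String) : Int × Int :=
  let ry := pvRYs nucl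
  let ryc : Char := if ry = 'R' then 'Y' else 'R'
  let left := pvRunLoop seq 0 none (PySem.List.pyRange (pos - 1) 0 (-1))
  let right := pvRunLoop seq 0 none (PySem.List.pyRange (pos + 1) (PySem.Str.len seq) 1)
  let primary := (if left.2 = some ry then left.1 else 0) + (if right.2 = some ry then right.1 else 0)
  let compl := max (if left.2 = some ryc then left.1 else 0) (if right.2 = some ryc then right.1 else 0)
  if ry = 'R' then (1 + primary, compl) else (compl, 1 + primary)

-- ===== PRECONDITION & SPEC =====
-- Pre_ excludes exactly the inputs where Python A raises IndexError: pos ≥ 2 with pos - 1 past the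
-- right end (left scan's first index out of range), or pos + 1 below -len(seq) (right scan's first
-- index out of range even after negative wraparound). B raises there too.
def Pre_calc_RY (seq : String) (pos : Int) (nucl : String) : Prop :=
  (pos ≤ 1 ∨ pos ≤ PySem.Str.len seq) ∧ -(PySem.Str.len seq) - 1 ≤ pos
instance (seq : String) (pos : Int) (nucl : String) : Decidable (Pre_calc_RY seq pos nucl) := by unfold Pre_calc_RY; infer_instance

def pvWitness_calc_RY : String × Int × String := ("AGTCA", 2, "A")

def Spec_calc_RY (seq : String) (pos : Int) (nucl : String) (out : Int × Int) : Prop := out = calc_RY_alt seq pos nucl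
instance (seq : String) (pos : Int) (nucl : String) (out : Int × Int) : Decidable (Spec_calc_RY seq pos nucl out) := by unfold Spec_calc_RY; infer_instance

-- ===== CLAIM (what is proved, stated in full; the proofs are below) =====
def Claim_equal_calc_RY : Prop := ∀ (seq : String) (pos : Int) (nucl : String), Dom_calc_RY seq pos nucl → Pre_calc_RY seq pos nucl → Spec_calc_RY seq pos nucl (calc_RY seq pos nucl)

-- ===== LEMMAS AND PROOFS =====

-- once the run type is fixed at c, B's scan counts exactly A's one-type chain for target c
lemma pvRunLoop_some (seq : String) (c : Char) :
    ∀ (idxs : List Int) (n : Int), pvRunLoop seq n (some c) idxs = (n + pvCountChain seq c idxs, some c) := by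
  intro idxs
  induction idxs with
  | nil => intro n; simp [pvRunLoop, pvCountChain]
  | cons i rest ih =>
    intro n
    simp only [pvRunLoop, pvCountChain]
    cases h : PySem.Str.pyGet? seq i with
    | none => simp
    | some ch =>
      by_cases hc : pvRYc ch = c
      · simp [hc, ih]; ring
      · simp [hc]

-- B's per-side scan from the initial state determines each of A's per-side chains
lemma pvRun_key (seq : String) (c : Char) (idxs : List Int) :
    (if (pvRunLoop seq 0 none idxs).2 = some c then (pvRunLoop seq 0 none idxs).1 else 0)
      = pvCountChain seq c idxs := by
  cases idxs with
  | nil => simp [pvRunLoop, pvCountChain]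
  | cons i rest =>
    simp only [pvRunLoop, pvCountChain]
    cases h : PySem.Str.pyGet? seq i with
    | none => simp
    | some ch =>
      by_cases hc : pvRYc ch = c
      · simp [pvRunLoop_some, hc]
      · simp [pvRunLoop_some, hc]

-- ===== VERDICT (by name: the statement is the Claim_ definition above) =====
theorem calc_RY_spec : Claim_equal_calc_RY := by
  intro seq pos nucl _ _
  unfold Spec_calc_RY calc_RY calc_RY_alt
  simp only [pvRun_key]
  by_cases h : pvRYs nucl = 'R' <;> simp [h]
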